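-- pv_equiv track=rewrite | github.com/Jack-Liu0227/inversedesign | src/common/material_doc_store.py | _split_markdown_chunks
-- ===== SOURCE A (Python) =====
-- def _split_markdown_chunks(text: str) -> list[tuple[str, str]]:
--     out, title, cur = [], "Overview", []
--     for line in str(text or "").splitlines():
--         line = str(line).rstrip()
--         if line.startswith("#"):
--             content = "\n".join(cur).strip()
--             if content:
--                 out.append((title, content))
--             title, cur = line.lstrip("#").strip() or "Overview", []
--             continue
--         cur.append(line)
--     content = "\n".join(cur).strip()
--     if content:
--         out.append((title, content))
--     return out
-- ===== SOURCE B (Python) =====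
-- def _split_markdown_chunks(text: str) -> list[tuple[str, str]]:
--     # Group-at-a-time: scan for the next heading index, emit the slice between
--     # headings as one chunk, instead of flushing a per-line buffer.
--     lines = [line.rstrip() for line in str(text or "").splitlines()]
--     out = []
--     title = "Overview"
--     pos = 0
--     while True:
--         j = pos
--         while j < len(lines) and not lines[j].startswith("#"):
--             j += 1
--         content = "\n".join(lines[pos:j]).strip()
--         if content:
--             out.append((title, content))
--         if j == len(lines):
--             return out
--         title = lines[j].lstrip("#").strip() or "Overview"
--         pos = j + 1
-- ===== Notes on version B (the rewrite author's own statement) =====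
-- stated objective: alternative
-- what changed: B scans group-at-a-time: it rstrips all lines up front, then repeatedly finds the next heading index and joins the slice between headings into one chunk, instead of A's per-line loop that flushes a growing cur buffer at each heading.
import Mathlib
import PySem

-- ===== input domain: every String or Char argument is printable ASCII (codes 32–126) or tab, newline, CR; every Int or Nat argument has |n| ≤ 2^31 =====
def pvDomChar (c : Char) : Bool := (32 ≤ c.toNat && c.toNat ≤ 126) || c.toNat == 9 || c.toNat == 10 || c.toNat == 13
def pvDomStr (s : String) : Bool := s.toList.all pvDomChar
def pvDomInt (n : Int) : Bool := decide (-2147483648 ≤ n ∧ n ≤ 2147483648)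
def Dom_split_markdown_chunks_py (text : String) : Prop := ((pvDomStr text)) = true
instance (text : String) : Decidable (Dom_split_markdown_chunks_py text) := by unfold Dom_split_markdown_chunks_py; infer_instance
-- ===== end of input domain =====

-- B replaces A's per-line flush of a growing buffer by a group-at-a-time scan
-- (next-heading search + slice join); alternative decomposition, same cost.


-- ===== PORT A =====
-- line.lstrip("#").strip() or "Overview"  (lstrip("#") ported by hand as
-- dropWhile (· == '#') on the char list: exact, since the strip-set is {'#'})
def pvHeadTitle (line : String) : String :=
  let t := PySem.Str.strip (String.ofList (line.toList.dropWhile (fun c => c == '#')))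
  if t = "" then "Overview" else t

-- the 'for line in …' loop of A, with its state (out, title, cur)
def pvALoop : List (String × String) → String → List String → List String → List (String × String)
  | out, title, cur, [] =>
      -- final flush after the loop
      let content := PySem.Str.strip (PySem.Str.join "\n" cur)
      if content ≠ "" then out ++ [(title, content)] else out
  | out, title, cur, line :: rest =>
      let line := PySem.Str.rstrip line
      if PySem.Str.startswith line "#" then
        let content := PySem.Str.strip (PySem.Str.join "\n" cur)
        let out' := if content ≠ "" then out ++ [(title, content)] else out
        pvALoop out' (pvHeadTitle line) [] rest
      else
        pvALoop out title (cur ++ [line]) rest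

def split_markdown_chunks_py (text : String) : List (String × String) :=
  -- str(text or "")
  pvALoop [] "Overview" [] (PySem.Str.splitlines (if text = "" then "" else text))

-- ===== PORT B =====
def pvNotHash (l : String) : Bool := !(PySem.Str.startswith l "#")

-- Source B's outer while-loop: the inner index scan 'while j < len(lines) and not
-- lines[j].startswith("#")' together with the slices lines[pos:j] / lines[j+1:]
-- is ported as takeWhile / dropWhile on the remaining suffix (exact: j - pos is
-- the length of the longest non-heading prefix of that suffix)
def pvBLoop (out : List (String × String)) (title : String) (lines : List String) :
    List (String × String) :=
  let pre := lines.takeWhile pvNotHash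
  let content := PySem.Str.strip (PySem.Str.join "\n" pre)
  let out' := if content ≠ "" then out ++ [(title, content)] else out
  match _h : lines.dropWhile pvNotHash with
  | [] => out'
  | hl :: tl => pvBLoop out' (pvHeadTitle hl) tl
termination_by lines.length
decreasing_by
  have hle := List.length_dropWhile_le pvNotHash lines
  rw [_h] at hle; simp at hle; omega

def split_markdown_chunks_py_alt (text : String) : List (String × String) :=
  pvBLoop [] "Overview"
    ((PySem.Str.splitlines (if text = "" then "" else text)).map PySem.Str.rstrip)

-- ===== PRECONDITION & SPEC =====
def Spec_split_markdown_chunks_py (text : String) (out : List (String × String)) : Prop := out = split_markdown_chunks_py_alt text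
instance (text : String) (out : List (String × String)) : Decidable (Spec_split_markdown_chunks_py text out) := by unfold Spec_split_markdown_chunks_py; infer_instance

-- ===== CLAIM (what is proved, stated in full; the proofs are below) =====
def Claim_equal_split_markdown_chunks_py : Prop := ∀ (text : String), Dom_split_markdown_chunks_py text → Spec_split_markdown_chunks_py text (split_markdown_chunks_py text)

-- ===== LEMMAS AND PROOFS =====

-- B's loop body with a pending prefix `cur` glued in front of the current group
def pvGB (out : List (String × String)) (title : String) (cur : List String)
    (lines : List String) : List (String × String) :=
  let pre := lines.takeWhile pvNotHash
  let content := PySem.Str.strip (PySem.Str.join "\n" (cur ++ pre))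
  let out' := if content ≠ "" then out ++ [(title, content)] else out
  match _h : lines.dropWhile pvNotHash with
  | [] => out'
  | hl :: tl => pvBLoop out' (pvHeadTitle hl) tl

lemma pvGB_nil_cur (out : List (String × String)) (title : String) (lines : List String) :
    pvGB out title [] lines = pvBLoop out title lines := by
  rw [pvBLoop, pvGB]
  simp

lemma pvALoop_eq_pvGB (lines : List String) :
    ∀ out title cur, pvALoop out title cur lines = pvGB out title cur (lines.map PySem.Str.rstrip) := by
  induction lines with
  | nil => intro out title cur; simp [pvALoop, pvGB]
  | cons line rest ih =>
    intro out title cur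
    simp only [List.map_cons, pvALoop]
    by_cases hs : PySem.Str.startswith (PySem.Str.rstrip line) "#"
    · have hb : pvNotHash (PySem.Str.rstrip line) = false := by
        unfold pvNotHash; rw [hs]; rfl
      rw [if_pos hs, ih, pvGB_nil_cur]
      unfold pvGB
      rw [List.takeWhile_cons_of_neg (by simp [hb]), List.dropWhile_cons_of_neg (by simp [hb])]
      simp
    · have hb : pvNotHash (PySem.Str.rstrip line) = true := by
        unfold pvNotHash; rw [Bool.eq_false_iff.mpr hs]; rfl
      rw [if_neg hs, ih]
      unfold pvGB
      rw [List.takeWhile_cons_of_pos hb, List.dropWhile_cons_of_pos hb]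
      simp

-- ===== VERDICT (by name: the statement is the Claim_ definition above) =====
theorem split_markdown_chunks_py_spec : Claim_equal_split_markdown_chunks_py := by
  intro text _
  unfold Spec_split_markdown_chunks_py split_markdown_chunks_py split_markdown_chunks_py_alt
  rw [pvALoop_eq_pvGB, pvGB_nil_cur]
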